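-- pv_equiv track=rewrite | github.com/botond-ai/GasAgent | mini_projects/gyenes.lidia/backend/infrastructure/document_parser.py | get_document_metadata
-- ===== SOURCE A (Python) =====
-- def get_document_metadata(text: str) -> dict:
--     """
--     Extract basic metadata from parsed text.
--
--     Args:
--         text: Parsed document text
--
--     Returns:
--         Dictionary with metadata (word count, character count, etc.)
--     """
--     words = text.split()
--     lines = text.split('\n')
--
--     return {
--         'character_count': len(text),
--         'word_count': len(words),
--         'line_count': len(lines),
--         'paragraph_count': len([line for line in lines if line.strip()]),
--     }
-- ===== SOURCE B (Python) =====
-- def get_document_metadata(text: str) -> dict: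
--     """Single pass over the characters instead of three split/len passes."""
--     character_count = 0
--     word_count = 0
--     line_count = 1
--     paragraph_count = 0
--     prev_ws = True      # True at a word boundary (start of text or after whitespace)
--     line_has_text = False  # current line contains a non-whitespace character
--     for ch in text:
--         character_count += 1
--         if ch == '\n':
--             line_count += 1
--             if line_has_text:
--                 paragraph_count += 1
--             line_has_text = False
--         elif not ch.isspace():
--             line_has_text = True
--         if ch.isspace():
--             prev_ws = True
--         else:
--             if prev_ws:
--                 word_count += 1
--             prev_ws = False
--     if line_has_text:
--         paragraph_count += 1
--     return {
--         'character_count': character_count,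
--         'word_count': word_count,
--         'line_count': line_count,
--         'paragraph_count': paragraph_count,
--     }
-- ===== Notes on version B (the rewrite author's own statement) =====
-- stated objective: alternative
-- what changed: Replaces A's three library passes (whitespace split, newline split, a strip-based comprehension) by a single explicit loop over the characters that maintains all four counters at once (word boundaries via whitespace transitions, paragraphs via a line-has-text flag).
import Mathlib
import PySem

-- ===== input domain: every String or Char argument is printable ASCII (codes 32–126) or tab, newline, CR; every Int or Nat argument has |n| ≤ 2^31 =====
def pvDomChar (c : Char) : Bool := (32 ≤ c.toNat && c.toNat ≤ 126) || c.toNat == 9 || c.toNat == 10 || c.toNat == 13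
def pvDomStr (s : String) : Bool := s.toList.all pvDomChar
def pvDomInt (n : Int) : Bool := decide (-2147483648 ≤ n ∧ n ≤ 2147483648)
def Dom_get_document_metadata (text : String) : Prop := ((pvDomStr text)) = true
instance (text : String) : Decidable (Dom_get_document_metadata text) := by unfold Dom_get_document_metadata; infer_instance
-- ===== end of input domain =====

-- B computes the same four counts in one fold over the characters instead of A's separate split/strip passes (objective: alternative).

-- ===== PORT A =====
def get_document_metadata (text : String) : List (String × Int) :=
  let words := PySem.Str.split₀ text
  let lines := (PySem.Chars.splitOn text.toList "\n".toList).map String.ofList  -- text.split('\n'), sep ≠ ''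
  [("character_count", PySem.Str.len text),
   ("word_count", PySem.List.len words),
   ("line_count", PySem.List.len lines),
   ("paragraph_count", PySem.List.len (lines.filter (fun line => !(PySem.Str.strip line == ""))))]

-- ===== PORT B =====
-- one step of B's loop; state = (character_count, word_count, line_count, paragraph_count, prev_ws, line_has_text)
def pvStep (st : Int × Int × Int × Int × Bool × Bool) (ch : Char) : Int × Int × Int × Int × Bool × Bool :=
  match st with
  | (cc, wc, lc, pc, prevWs, lineHas) =>
    let cc := cc + 1
    let (lc, pc, lineHas) :=
      if ch = '\n' then (lc + 1, if lineHas then pc + 1 else pc, false)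
      else if !(PySem.Chars.isspace ch) then (lc, pc, true)
      else (lc, pc, lineHas)
    let (wc, prevWs) :=
      if PySem.Chars.isspace ch then (wc, true)
      else ((if prevWs then wc + 1 else wc), false)
    (cc, wc, lc, pc, prevWs, lineHas)

def get_document_metadata_alt (text : String) : List (String × Int) :=
  match text.toList.foldl pvStep (0, 0, 1, 0, true, false) with
  | (cc, wc, lc, pc, _, lineHas) =>
    [("character_count", cc),
     ("word_count", wc),
     ("line_count", lc),
     ("paragraph_count", if lineHas then pc + 1 else pc)]

-- ===== PRECONDITION & SPEC =====
def Spec_get_document_metadata (text : String) (out : List (String × Int)) : Prop := out = get_document_metadata_alt text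
instance (text : String) (out : List (String × Int)) : Decidable (Spec_get_document_metadata text out) := by unfold Spec_get_document_metadata; infer_instance

-- ===== CLAIM (what is proved, stated in full; the proofs are below) =====
def Claim_equal_get_document_metadata : Prop := ∀ (text : String), Dom_get_document_metadata text → Spec_get_document_metadata text (get_document_metadata text)

-- ===== LEMMAS AND PROOFS =====

-- word count: words begun in cs, given pw = "at a word boundary (start or after whitespace)"
def pvWc (pw : Bool) : List Char → Nat
  | [] => 0
  | c :: r => if PySem.Chars.isspace c then pvWc true r else (if pw then 1 else 0) + pvWc false r

-- paragraph count: nonblank lines completed in cs, given lh = "current line already has non-whitespace"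
def pvPc (lh : Bool) : List Char → Nat
  | [] => if lh then 1 else 0
  | c :: r => if c = '\n' then (if lh then 1 else 0) + pvPc false r
              else pvPc (lh || !PySem.Chars.isspace c) r

-- "l contains a non-whitespace character" = Python's bool(l.strip())
def pvHas (l : List Char) : Bool := l.any (fun c => !PySem.Chars.isspace c)

lemma pvFold_components (cs : List Char) : ∀ (cc wc lc pc : Int) (pw lh : Bool),
    (cs.foldl pvStep (cc, wc, lc, pc, pw, lh)).1 = cc + cs.length ∧
    (cs.foldl pvStep (cc, wc, lc, pc, pw, lh)).2.1 = wc + pvWc pw cs ∧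
    (cs.foldl pvStep (cc, wc, lc, pc, pw, lh)).2.2.1 = lc + cs.count '\n' ∧
    (if (cs.foldl pvStep (cc, wc, lc, pc, pw, lh)).2.2.2.2.2 then
        (cs.foldl pvStep (cc, wc, lc, pc, pw, lh)).2.2.2.1 + 1
      else (cs.foldl pvStep (cc, wc, lc, pc, pw, lh)).2.2.2.1) = pc + pvPc lh cs := by
  induction cs with
  | nil => intro cc wc lc pc pw lh; simp [pvWc, pvPc]; split <;> simp
  | cons c r ih =>
    intro cc wc lc pc pw lh
    by_cases hn : c = '\n'
    · subst hn
      obtain ⟨h1, h2, h3, h4⟩ := ih (cc+1) wc (lc+1) (if lh = true then pc+1 else pc) true false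
      simp only [List.foldl_cons, pvStep, if_pos rfl, List.count_cons, pvWc, pvPc,
        show PySem.Chars.isspace '\n' = true from rfl, if_true, Bool.not_true]
      refine ⟨by rw [h1]; simp; push_cast; omega, by rw [h2], by rw [h3]; simp; push_cast; omega, ?_⟩
      rw [h4]; cases lh <;> simp <;> push_cast <;> omega
    · by_cases hs : PySem.Chars.isspace c = true
      · obtain ⟨h1, h2, h3, h4⟩ := ih (cc+1) wc lc pc true lh
        simp only [List.foldl_cons, pvStep, if_neg hn, hs, if_true, Bool.not_true,
          Bool.false_eq_true, if_false, List.count_cons, pvWc, pvPc]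
        refine ⟨by rw [h1]; simp; push_cast; omega, by rw [h2], ?_, ?_⟩
        · rw [h3]; simp [hn]
        · rw [h4]; simp [hn, hs]
      · obtain ⟨h1, h2, h3, h4⟩ := ih (cc+1) (if pw = true then wc+1 else wc) lc pc false true
        rw [Bool.not_eq_true] at hs
        simp only [List.foldl_cons, pvStep, if_neg hn, hs, Bool.not_false, if_true,
          Bool.false_eq_true, if_false, List.count_cons, pvWc, pvPc]
        refine ⟨by rw [h1]; simp; push_cast; omega, ?_, ?_, ?_⟩
        · rw [h2]; cases pw <;> simp <;> push_cast <;> omega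
        · rw [h3]; simp [hn]
        · rw [h4]; simp [hn, hs]

lemma pvSplit₀_go_length (cs : List Char) : ∀ (cur : List Char) (acc : List (List Char)),
    (PySem.Chars.split₀.go cs cur acc).length =
      acc.length + (if cur.isEmpty then pvWc true cs else 1 + pvWc false cs) := by
  induction cs with
  | nil =>
    intro cur acc
    simp only [PySem.Chars.split₀.go, pvWc]
    cases cur <;> simp
  | cons c r ih =>
    intro cur acc
    by_cases hs : PySem.Chars.isspace c = true
    · cases cur <;>
        simp [PySem.Chars.split₀.go, hs, pvWc, ih] <;> omega
    · rw [Bool.not_eq_true] at hs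
      cases cur <;> simp [PySem.Chars.split₀.go, hs, pvWc, ih] <;> omega

lemma pvSplitOn_go_length (fuel : Nat) : ∀ (l cur : List Char) (acc : List (List Char)),
    l.length < fuel →
    (PySem.Chars.splitOn.go ['\n'] fuel l cur acc).length = acc.length + 1 + l.count '\n' := by
  induction fuel with
  | zero => intro l cur acc h; omega
  | succ n ih =>
    intro l cur acc h
    cases l with
    | nil => simp [PySem.Chars.splitOn.go]
    | cons c rest =>
      by_cases hn : c = '\n'
      · subst hn
        simp only [PySem.Chars.splitOn.go, List.isPrefixOf, List.count_cons]
        rw [if_pos (by simp)]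
        simp [ih _ _ _ (by simpa using Nat.lt_of_succ_lt_succ h), List.count_cons]
        omega
      · simp only [PySem.Chars.splitOn.go, List.count_cons]
        rw [if_neg (by simp [List.isPrefixOf]; exact fun e => hn e.symm)]
        simp [ih _ _ _ (Nat.lt_of_succ_lt_succ h), hn]

lemma pvSplitOn_go_countP (fuel : Nat) : ∀ (l cur : List Char) (acc : List (List Char)),
    l.length < fuel →
    ((PySem.Chars.splitOn.go ['\n'] fuel l cur acc).countP pvHas) =
      acc.countP pvHas + pvPc (pvHas cur) l := by
  induction fuel with
  | zero => intro l cur acc h; omega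
  | succ n ih =>
    intro l cur acc h
    cases l with
    | nil =>
      simp [PySem.Chars.splitOn.go, pvPc, List.countP_cons, pvHas]
    | cons c rest =>
      by_cases hn : c = '\n'
      · subst hn
        simp only [PySem.Chars.splitOn.go]
        rw [if_pos (by simp)]
        rw [ih _ _ _ (by simpa using Nat.lt_of_succ_lt_succ h)]
        simp [pvPc, pvHas, List.countP_cons]
        omega
      · simp only [PySem.Chars.splitOn.go]
        rw [if_neg (by simp [List.isPrefixOf]; exact fun e => hn e.symm)]
        rw [ih _ _ _ (Nat.lt_of_succ_lt_succ h)]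
        simp [pvPc, hn, pvHas]
        rw [Bool.or_comm]

lemma pvStrip_eq_nil (l : List Char) : (PySem.Chars.strip l = []) ↔ (pvHas l = false) := by
  simp only [PySem.Chars.strip, PySem.Chars.rstrip, PySem.Chars.lstrip, List.reverse_eq_nil_iff,
    List.dropWhile_eq_nil_iff, List.mem_reverse, pvHas, List.any_eq_false, Bool.not_eq_true']
  constructor
  · intro hd x hx
    rcases List.mem_append.mp ((List.takeWhile_append_dropWhile (p := PySem.Chars.isspace) (l := l)) ▸ hx) with h1 | h2
    · simp [List.mem_takeWhile_imp h1]
    · simp [hd x h2]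
  · intro hall x hx
    simpa using hall x (List.dropWhile_subset _ hx)

-- ===== VERDICT (by name: the statement is the Claim_ definition above) =====
theorem get_document_metadata_spec : Claim_equal_get_document_metadata := by
  intro text _
  unfold Spec_get_document_metadata get_document_metadata get_document_metadata_alt
  obtain ⟨h1, h2, h3, h4⟩ := pvFold_components text.toList 0 0 1 0 true false
  rcases hres : text.toList.foldl pvStep (0, 0, 1, 0, true, false) with ⟨cc, wc, lc, pc, pw, lh⟩
  rw [hres] at h1 h2 h3 h4
  simp only at h1 h2 h3 h4
  simp only [hres]
  have e1 : PySem.Str.len text = cc := by rw [PySem.Str.len_eq, h1]; push_cast; ring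
  have e2 : PySem.List.len (PySem.Str.split₀ text) = wc := by
    rw [h2]
    simp [PySem.List.len, PySem.Str.split₀, PySem.Chars.split₀, pvSplit₀_go_length]
  have hsep : ("\n".toList : List Char) = ['\n'] := rfl
  have e3 : PySem.List.len ((PySem.Chars.splitOn text.toList "\n".toList).map String.ofList) = lc := by
    rw [h3]
    simp only [PySem.List.len, PySem.Chars.splitOn, hsep, List.length_map]
    rw [pvSplitOn_go_length (text.toList.length + 1) text.toList [] [] (Nat.lt_succ_self _)]
    push_cast; simp
  have e4 : PySem.List.len
      (((PySem.Chars.splitOn text.toList "\n".toList).map String.ofList).filter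
        (fun line => !(PySem.Str.strip line == ""))) = (if lh then pc + 1 else pc) := by
    rw [h4]
    have hpt : ∀ l : List Char, (!(PySem.Str.strip (String.ofList l) == "")) = pvHas l := by
      intro l
      cases hl : pvHas l
      · have h0 := (pvStrip_eq_nil l).mpr hl
        simp [PySem.Str.strip, h0]
      · have h0 : ¬ (PySem.Chars.strip l = []) := fun e => by
          rw [(pvStrip_eq_nil l).mp e] at hl; exact Bool.false_ne_true hl
        simp only [PySem.Str.strip, Bool.not_eq_eq_eq_not, Bool.not_true, beq_eq_false_iff_ne,
          ne_eq]
        intro e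
        exact h0 (by simpa using congrArg String.toList e)
    simp only [PySem.List.len, hsep, ← List.countP_eq_length_filter, List.countP_map]
    have hc : ((PySem.Chars.splitOn text.toList ['\n']).countP
        ((fun line => !(PySem.Str.strip line == "")) ∘ String.ofList)) =
        ((PySem.Chars.splitOn text.toList ['\n']).countP pvHas) := by
      apply List.countP_congr
      intro l _
      simp only [Function.comp_apply]
      exact congrArg (· = true) (hpt l) ▸ Iff.rfl
    rw [hc]
    simp only [PySem.Chars.splitOn]
    rw [pvSplitOn_go_countP (text.toList.length + 1) text.toList [] [] (Nat.lt_succ_self _)]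
    simp [pvHas]
  rw [e1, e2, e3, e4]
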